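-- pv_equiv track=rewrite | github.com/naruto-2002/PYTHON | thuc_hanh_lan_2/so_thuan_ngich.py | count_palindromes_in_range
-- ===== SOURCE A (Python) =====
-- def is_palindrome_in_base(num, base):
--     digits = []
--     while num:
--         digits.append(num % base)
--         num //= base
--     for i in range(len(digits)//2):
--         if digits[i] != digits[-(i+1)]:
--             return False
--     return True
--
-- def count_palindromes_in_range(start, end, base_max):
--     count = 0
--     for i in range(start, end+1):
--         is_palindrome = True
--         for base in range(2, base_max+1):
--             if not is_palindrome_in_base(i, base):
--                 is_palindrome = False
--                 break
--         if is_palindrome: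
--             count += 1
--     return count
-- ===== SOURCE B (Python) =====
-- def count_palindromes_in_range(start, end, base_max):
--     def is_pal(num, base):
--         n, rev = num, 0
--         while n:
--             rev = rev * base + n % base
--             n //= base
--         return rev == num
--     return sum(1 for i in range(start, end + 1)
--                if all(is_pal(i, b) for b in range(2, base_max + 1)))
-- ===== Notes on version B (the rewrite author's own statement) =====
-- stated objective: simpler
-- what changed: is_palindrome_in_base no longer builds a digit list and compares it with a two-pointer scan; B reverses the number arithmetically in one pass (rev = rev*base + n%base) and compares rev to the original, and the outer counting loop with flag/break becomes a sum over a generator with all().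
import Mathlib
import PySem

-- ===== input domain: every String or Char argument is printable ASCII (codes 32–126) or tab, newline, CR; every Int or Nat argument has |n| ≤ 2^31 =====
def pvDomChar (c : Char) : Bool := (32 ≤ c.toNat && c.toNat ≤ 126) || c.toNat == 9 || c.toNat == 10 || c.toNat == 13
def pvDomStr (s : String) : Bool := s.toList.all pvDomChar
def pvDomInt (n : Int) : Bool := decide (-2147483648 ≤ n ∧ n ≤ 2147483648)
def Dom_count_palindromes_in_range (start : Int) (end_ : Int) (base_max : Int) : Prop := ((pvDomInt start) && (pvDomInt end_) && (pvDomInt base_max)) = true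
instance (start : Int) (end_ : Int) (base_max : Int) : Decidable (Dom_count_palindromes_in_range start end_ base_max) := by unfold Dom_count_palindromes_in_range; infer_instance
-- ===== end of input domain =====

-- B replaces A's digit-list + two-pointer palindrome test by a one-pass arithmetic
-- reversal (rev = rev*base + n%base) compared with the original number (objective: simpler).

-- termination measure fact for the 'while' loops (cited by the ports' decreasing_by)
theorem pvFloordivLt (num base : Int) (h : 0 < num ∧ 1 < base) :
    (PySem.Int.floordiv num base).toNat < num.toNat := by
  have h1 : PySem.Int.floordiv num base = num / base :=
    PySem.Int.floordiv_eq_ediv_of_pos (by omega)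
  have h2 : num / base < num := by
    apply Int.ediv_lt_of_lt_mul (by omega); nlinarith [h.1, h.2]
  have h3 : 0 ≤ num / base := Int.ediv_nonneg (by omega) (by omega)
  simp [h1]; omega

-- ===== PORT A =====
-- 'while num:' of A: in Python this diverges for num < 0 (num //= base stays -1), so the
-- loop guard here is '0 < num' — exact on Pre_ (which excludes the diverging inputs);
-- base is always ≥ 2 at call sites, the '1 < base' guard only serves termination.
def pvDigitsLoopA (num base : Int) (digits : List Int) : List Int :=
  if h : 0 < num ∧ 1 < base then
    pvDigitsLoopA (PySem.Int.floordiv num base) base (digits ++ [PySem.Int.mod num base])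
  else digits
termination_by num.toNat
decreasing_by exact pvFloordivLt _ _ h

-- 'for i in range(len(digits)//2): if digits[i] != digits[-(i+1)]: return False'
def pvPalLoopA (digits : List Int) : List Int → Bool
  | [] => true
  | i :: rest =>
    if PySem.List.pyGetD digits i 0 ≠ PySem.List.pyGetD digits (-(i+1)) 0 then false
    else pvPalLoopA digits rest

def is_palindrome_in_base (num base : Int) : Bool :=
  let digits := pvDigitsLoopA num base []
  pvPalLoopA digits
    (PySem.List.pyRange 0 (PySem.Int.floordiv (PySem.List.len digits) 2) 1)

-- inner 'for base in …: if not is_palindrome_in_base(i, base): is_palindrome = False; break'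
def pvBaseLoopA (i : Int) : List Int → Bool
  | [] => true
  | b :: rest =>
    if ¬ is_palindrome_in_base i b then false else pvBaseLoopA i rest

def count_palindromes_in_range (start : Int) (end_ : Int) (base_max : Int) : Int :=
  (PySem.List.pyRange start (end_ + 1) 1).foldl
    (fun count i =>
      if pvBaseLoopA i (PySem.List.pyRange 2 (base_max + 1) 1) then count + 1 else count) 0

-- ===== PORT B =====
-- same 'while n:' shape as A, hence the same '0 < n' guard (exact on Pre_)
def pvRevLoopB (n base rev : Int) : Int :=
  if h : 0 < n ∧ 1 < base then
    pvRevLoopB (PySem.Int.floordiv n base) base (rev * base + PySem.Int.mod n base)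
  else rev
termination_by n.toNat
decreasing_by exact pvFloordivLt _ _ h

def pvIsPalB (num base : Int) : Bool := pvRevLoopB num base 0 == num

def count_palindromes_in_range_alt (start : Int) (end_ : Int) (base_max : Int) : Int :=
  ((PySem.List.pyRange start (end_ + 1) 1).filter
    (fun i => (PySem.List.pyRange 2 (base_max + 1) 1).all (fun b => pvIsPalB i b))).length

-- ===== PRECONDITION & SPEC =====
-- Pre_ excludes exactly the inputs on which the Python A never returns: if some i in
-- range(start, end+1) is negative and the base range 2..base_max is non-empty, the
-- 'while num:' loop of A (and of B alike) runs forever on that i.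
def Pre_count_palindromes_in_range (start : Int) (end_ : Int) (base_max : Int) : Prop :=
  0 ≤ start ∨ end_ < start ∨ base_max < 2
instance (start : Int) (end_ : Int) (base_max : Int) : Decidable (Pre_count_palindromes_in_range start end_ base_max) := by unfold Pre_count_palindromes_in_range; infer_instance

def pvWitness_count_palindromes_in_range : Int × Int × Int := (1, 10, 3)

def Spec_count_palindromes_in_range (start : Int) (end_ : Int) (base_max : Int) (out : Int) : Prop := out = count_palindromes_in_range_alt start end_ base_max
instance (start : Int) (end_ : Int) (base_max : Int) (out : Int) : Decidable (Spec_count_palindromes_in_range start end_ base_max out) := by unfold Spec_count_palindromes_in_range; infer_instance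

-- ===== CLAIM (what is proved, stated in full; the proofs are below) =====
def Claim_equal_count_palindromes_in_range : Prop := ∀ (start : Int) (end_ : Int) (base_max : Int), Dom_count_palindromes_in_range start end_ base_max → Pre_count_palindromes_in_range start end_ base_max → Spec_count_palindromes_in_range start end_ base_max (count_palindromes_in_range start end_ base_max)

-- ===== LEMMAS AND PROOFS =====

-- the digit list of A's while loop, accumulator-free
def pvDL (num base : Int) : List Int :=
  if h : 0 < num ∧ 1 < base then
    PySem.Int.mod num base :: pvDL (PySem.Int.floordiv num base) base
  else []
termination_by num.toNat
decreasing_by exact pvFloordivLt _ _ h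

theorem pvDigitsLoopA_eq (num base : Int) (acc : List Int) :
    pvDigitsLoopA num base acc = acc ++ pvDL num base := by
  rw [pvDigitsLoopA, pvDL]
  split_ifs with h
  · rw [pvDigitsLoopA_eq (PySem.Int.floordiv num base) base]
    simp
  · simp
termination_by num.toNat
decreasing_by exact pvFloordivLt _ _ h

-- value (LSB first) of a digit list
def pvVal (base : Int) : List Int → Int
  | [] => 0
  | d :: ds => d + base * pvVal base ds

theorem pvVal_pvDL (num base : Int) (h0 : 0 ≤ num) (hb : 1 < base) :
    pvVal base (pvDL num base) = num := by
  rw [pvDL]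
  split_ifs with h
  · have hfd : PySem.Int.floordiv num base = num / base :=
      PySem.Int.floordiv_eq_ediv_of_pos (by omega)
    have hrec : pvVal base (pvDL (PySem.Int.floordiv num base) base)
        = PySem.Int.floordiv num base :=
      pvVal_pvDL _ base (by rw [hfd]; exact Int.ediv_nonneg (by omega) (by omega)) hb
    rw [pvVal, hrec]
    have hdm := PySem.Int.floordiv_mul_add_mod num base
    linarith
  · rw [pvVal]; omega
termination_by num.toNat
decreasing_by exact pvFloordivLt _ _ h

theorem pvDL_bounds (num base : Int) (hb : 1 < base) :
    ∀ d ∈ pvDL num base, 0 ≤ d ∧ d < base := by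
  rw [pvDL]
  split_ifs with h
  · intro d hd
    rcases List.mem_cons.mp hd with h1 | h2
    · subst h1
      exact ⟨PySem.Int.mod_nonneg _ (by omega), PySem.Int.mod_lt _ (by omega)⟩
    · exact pvDL_bounds _ base hb d h2
  · intro d hd; cases hd
termination_by num.toNat
decreasing_by exact pvFloordivLt _ _ h

theorem pvRevLoopB_foldl (num base r : Int) :
    pvRevLoopB num base r = (pvDL num base).foldl (fun a d => a * base + d) r := by
  rw [pvRevLoopB, pvDL]
  split_ifs with h
  · rw [pvRevLoopB_foldl]; simp [List.foldl]
  · simp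
termination_by num.toNat
decreasing_by exact pvFloordivLt _ _ h

theorem pvVal_append_singleton (base d : Int) (l : List Int) :
    pvVal base (l ++ [d]) = pvVal base l + base ^ l.length * d := by
  induction l with
  | nil => simp [pvVal]
  | cons a t ih => simp [pvVal, ih, pow_succ]; ring

theorem pvFoldl_horner (base : Int) (l : List Int) (r : Int) :
    l.foldl (fun a d => a * base + d) r = r * base ^ l.length + pvVal base l.reverse := by
  induction l generalizing r with
  | nil => simp [pvVal]
  | cons a t ih =>
    rw [List.foldl_cons, ih, List.reverse_cons, pvVal_append_singleton]
    simp [pow_succ, List.length_reverse]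
    ring

theorem pvVal_inj (base : Int) (l1 l2 : List Int)
    (hlen : l1.length = l2.length)
    (h1 : ∀ d ∈ l1, 0 ≤ d ∧ d < base) (h2 : ∀ d ∈ l2, 0 ≤ d ∧ d < base)
    (hv : pvVal base l1 = pvVal base l2) : l1 = l2 := by
  induction l1 generalizing l2 with
  | nil =>
    cases l2 with
    | nil => rfl
    | cons b t => simp at hlen
  | cons a t ih =>
    cases l2 with
    | nil => simp at hlen
    | cons b u =>
      have ha := h1 a (List.mem_cons_self)
      have hb := h2 b (List.mem_cons_self)
      rw [pvVal, pvVal] at hv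
      have hdvd : base ∣ (a - b) := ⟨pvVal base u - pvVal base t, by linarith⟩
      have hab : a = b := by
        have := Int.eq_zero_of_abs_lt_dvd hdvd (by rw [abs_lt]; omega)
        omega
      have hvt : pvVal base t = pvVal base u := by
        have hbpos : 0 < base := by omega
        have : base * pvVal base t = base * pvVal base u := by linarith
        exact mul_left_cancel₀ (by omega) this
      rw [hab, ih u (by simpa using hlen)
        (fun d hd => h1 d (List.mem_cons_of_mem a hd))
        (fun d hd => h2 d (List.mem_cons_of_mem b hd)) hvt]

theorem pvPalLoopA_eq_all (digits : List Int) (is : List Int) :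
    pvPalLoopA digits is =
      is.all (fun i => PySem.List.pyGetD digits i 0 == PySem.List.pyGetD digits (-(i+1)) 0) := by
  induction is with
  | nil => rfl
  | cons i rest ih =>
    rw [pvPalLoopA, List.all_cons, ih]
    cases hbe : (PySem.List.pyGetD digits i 0 == PySem.List.pyGetD digits (-(i+1)) 0) with
    | false =>
      rw [if_pos (by simpa using hbe)]; simp
    | true =>
      have heq : PySem.List.pyGetD digits i 0 = PySem.List.pyGetD digits (-(i+1)) 0 := by
        simpa using hbe
      rw [if_neg (by simp [heq])]; simp

theorem pvHalfPal (l : List Int)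
    (h : ∀ k : Nat, (hk : k < l.length / 2) →
      l[k]'(by omega) = l[l.length - 1 - k]'(by omega)) : l.reverse = l := by
  apply List.ext_getElem (by simp)
  intro k h1 h2
  rw [List.getElem_reverse]
  by_cases hk : k < l.length / 2
  · exact (h k hk).symm
  · by_cases hj : l.length - 1 - k < l.length / 2
    · have := h (l.length - 1 - k) hj
      simp only [show l.length - 1 - (l.length - 1 - k) = k from by omega] at this
      exact this
    · simp only [show l.length - 1 - k = k from by omega]

theorem pvPalLoopA_iff_reverse (l : List Int) :
    (pvPalLoopA l (PySem.List.pyRange 0 (PySem.Int.floordiv (PySem.List.len l) 2) 1) = true)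
      ↔ l.reverse = l := by
  have hm : PySem.Int.floordiv (PySem.List.len l) 2 = ((l.length / 2 : Nat) : Int) := by
    rw [PySem.List.len_eq]
    exact_mod_cast PySem.Int.floordiv_natCast l.length 2
  rw [pvPalLoopA_eq_all, hm, List.all_eq_true]
  constructor
  · intro H
    apply pvHalfPal
    intro k hk
    have hmem : ((k : Int)) ∈ PySem.List.pyRange 0 ((l.length / 2 : Nat) : Int) 1 :=
      PySem.List.mem_pyRange_one.mpr ⟨by positivity, by exact_mod_cast hk⟩
    have hthis := H (k : Int) hmem
    rw [beq_iff_eq, PySem.List.pyGetD_natCast,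
      show (-((k : Int) + 1)) = -(((k + 1 : Nat) : Int)) from by push_cast; ring,
      PySem.List.pyGetD_neg_natCast l (k + 1) 0 (by omega) (by omega),
      List.getD_eq_getElem l 0 (by omega)] at hthis
    simp only [show l.length - (k + 1) = l.length - 1 - k from by omega] at hthis
    exact hthis
  · intro hrev i hmem
    obtain ⟨h0i, hiub⟩ := PySem.List.mem_pyRange_one.mp hmem
    have hik : i = ((i.toNat : Nat) : Int) := (Int.toNat_of_nonneg h0i).symm
    have hklt : i.toNat < l.length / 2 := by
      rw [hik] at hiub; exact_mod_cast hiub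
    rw [beq_iff_eq, hik, PySem.List.pyGetD_natCast,
      show (-((i.toNat : Int) + 1)) = -(((i.toNat + 1 : Nat) : Int)) from by push_cast; ring,
      PySem.List.pyGetD_neg_natCast l (i.toNat + 1) 0 (by omega) (by omega),
      List.getD_eq_getElem l 0 (by omega)]
    have hrv : l[i.toNat]'(by omega) = l.reverse[i.toNat]'(by simp; omega) := by
      simp [hrev]
    rw [List.getElem_reverse] at hrv
    simp only [show l.length - 1 - i.toNat = l.length - (i.toNat + 1) from by omega] at hrv
    exact hrv

theorem pvPal_agree (num base : Int) (h0 : 0 ≤ num) (hb : 1 < base) :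
    is_palindrome_in_base num base = pvIsPalB num base := by
  have hdl : pvDigitsLoopA num base [] = pvDL num base := by
    simpa using pvDigitsLoopA_eq num base []
  have hL : is_palindrome_in_base num base
      = pvPalLoopA (pvDL num base)
          (PySem.List.pyRange 0 (PySem.Int.floordiv (PySem.List.len (pvDL num base)) 2) 1) := by
    rw [is_palindrome_in_base, hdl]
  have hrev : pvRevLoopB num base 0 = pvVal base (pvDL num base).reverse := by
    rw [pvRevLoopB_foldl, pvFoldl_horner]; ring
  have hval : pvVal base (pvDL num base) = num := pvVal_pvDL num base h0 hb
  have h1 : (is_palindrome_in_base num base = true) ↔ (pvDL num base).reverse = pvDL num base := by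
    rw [hL]; exact pvPalLoopA_iff_reverse (pvDL num base)
  have h2 : (pvIsPalB num base = true) ↔ (pvDL num base).reverse = pvDL num base := by
    rw [pvIsPalB, beq_iff_eq, hrev]
    constructor
    · intro h
      exact pvVal_inj base (pvDL num base).reverse (pvDL num base) (by simp)
        (fun d hd => pvDL_bounds num base hb d (List.mem_reverse.mp hd))
        (pvDL_bounds num base hb) (h.trans hval.symm)
    · intro h; rw [h, hval]
  exact Bool.coe_iff_coe.mp (h1.trans h2.symm)

theorem pvBaseLoopA_eq_all (i : Int) (bs : List Int) :
    pvBaseLoopA i bs = bs.all (fun b => is_palindrome_in_base i b) := by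
  induction bs with
  | nil => rfl
  | cons b rest ih =>
    rw [pvBaseLoopA, List.all_cons, ih]
    by_cases h : is_palindrome_in_base i b <;> simp [h]

theorem pvFoldl_count (p q : Int → Bool) (xs : List Int) (c0 : Int)
    (hpq : ∀ x ∈ xs, p x = q x) :
    xs.foldl (fun c x => if p x then c + 1 else c) c0 = c0 + ((xs.filter q).length : Int) := by
  induction xs generalizing c0 with
  | nil => simp
  | cons x t ih =>
    rw [List.foldl_cons, List.filter_cons,
      ih _ (fun y hy => hpq y (List.mem_cons_of_mem x hy)),
      hpq x (List.mem_cons_self)]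
    by_cases h : q x = true
    · simp [h]; push_cast; ring
    · simp at h; simp [h]

theorem pvAllCongr (l : List Int) (p q : Int → Bool) (h : ∀ x ∈ l, p x = q x) :
    l.all p = l.all q := by
  induction l with
  | nil => rfl
  | cons a t ih =>
    simp only [List.all_cons, h a (List.mem_cons_self),
      ih (fun x hx => h x (List.mem_cons_of_mem a hx))]

-- ===== VERDICT (by name: the statement is the Claim_ definition above) =====
theorem count_palindromes_in_range_spec : Claim_equal_count_palindromes_in_range := by
  intro start end_ base_max _hdom hpre
  unfold Spec_count_palindromes_in_range
  unfold count_palindromes_in_range count_palindromes_in_range_alt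
  rw [pvFoldl_count (fun i => pvBaseLoopA i (PySem.List.pyRange 2 (base_max + 1) 1))
      (fun i => (PySem.List.pyRange 2 (base_max + 1) 1).all (fun b => pvIsPalB i b))
      _ 0 ?_]
  · simp
  · intro x hx
    simp only
    rw [pvBaseLoopA_eq_all]
    rcases hpre with h0 | hlt | hb
    · have hx0 : 0 ≤ x := by
        have := (PySem.List.mem_pyRange_one.mp hx).1; omega
      have : ∀ b ∈ PySem.List.pyRange 2 (base_max + 1) 1,
          is_palindrome_in_base x b = pvIsPalB x b := by
        intro b hb
        have h2 := (PySem.List.mem_pyRange_one.mp hb).1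
        exact pvPal_agree x b hx0 (by omega)
      exact pvAllCongr _ _ _ this
    · have hnil : PySem.List.pyRange start (end_ + 1) 1 = [] :=
        PySem.List.pyRange_one_eq_nil (by omega)
      rw [hnil] at hx; cases hx
    · have hnil : PySem.List.pyRange 2 (base_max + 1) 1 = [] :=
        PySem.List.pyRange_one_eq_nil (by omega)
      simp [hnil]
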